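-- pv_equiv track=rewrite | github.com/ShivaniiTS/LatestAIScribe | postprocessor/medasr_postprocessor.py | _deduplicate_chars
-- ===== SOURCE A (Python) =====
-- import itertools
--
-- def _deduplicate_chars(word: str) -> set:
--     w = word.lower()
--     doubles = []
--     i = 0
--     while i < len(w) - 1:
--         if w[i] == w[i + 1]:
--             doubles.append(i)
--             i += 2
--         else:
--             i += 1
--     if not doubles:
--         return {w}
--     doubles = doubles[:6]
--     results = set()
--     for combo in itertools.product([True, False], repeat=len(doubles)):
--         chars = list(w)
--         for keep, pos in sorted(zip(combo, doubles), reverse=True):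
--             if not keep and pos < len(chars):
--                 del chars[pos]
--         results.add(''.join(chars))
--     return results
-- ===== SOURCE B (Python) =====
-- def _deduplicate_chars(word: str) -> set:
--     w = word.lower()
--     n = len(w)
--     # one greedy left-to-right pass: each token is a single char or a doubled pair;
--     # only the first 6 doubled pairs are branchable
--     tokens = []
--     i = 0
--     k = 0
--     while i < n:
--         if i + 1 < n and w[i] == w[i + 1]:
--             tokens.append((w[i], k < 6))
--             k += 1
--             i += 2
--         else:
--             tokens.append((w[i], None))
--             i += 1
--     # build the variants back-to-front so the earliest double varies slowest
--     parts = ['']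
--     for ch, branch in reversed(tokens):
--         if branch is None:
--             parts = [ch + p for p in parts]
--         elif branch:
--             parts = [ch * 2 + p for p in parts] + [ch + p for p in parts]
--         else:
--             parts = [ch * 2 + p for p in parts]
--     return set(parts)
-- ===== Notes on version B (the rewrite author's own statement) =====
-- stated objective: alternative
-- what changed: B replaces A's enumeration of 2^k keep/drop index combinations (each rebuilding the char list, sorting the deletion positions and deleting in place) by one greedy tokenising pass (single chars vs doubled pairs, the first 6 pairs branchable) followed by an iterative fold over the reversed tokens that builds the variant strings incrementally, branching in two at each branchable pair; the final set() removes duplicates once.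
import Mathlib
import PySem

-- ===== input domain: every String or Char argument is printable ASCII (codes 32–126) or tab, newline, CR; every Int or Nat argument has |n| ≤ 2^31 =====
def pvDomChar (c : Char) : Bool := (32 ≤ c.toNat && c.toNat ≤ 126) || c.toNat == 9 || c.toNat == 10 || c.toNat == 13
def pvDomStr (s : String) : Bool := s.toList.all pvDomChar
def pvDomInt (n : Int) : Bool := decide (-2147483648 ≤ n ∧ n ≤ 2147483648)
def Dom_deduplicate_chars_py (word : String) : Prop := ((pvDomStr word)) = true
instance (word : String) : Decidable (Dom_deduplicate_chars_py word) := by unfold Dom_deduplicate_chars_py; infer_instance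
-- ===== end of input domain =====

-- B builds the variant strings by one greedy tokenising pass plus an iterative fold over the
-- reversed tokens, branching at the first 6 doubled pairs, instead of A's enumeration of 2^k
-- keep/drop index combinations with per-combo position sorting and in-place deletion
-- (objective: alternative).


-- ===== PORT A =====
-- the while-loop 'i += 2 on a double, else i += 1' collecting double positions
def pvScanA : List Char → Nat → List Nat
  | [], _ => []
  | [_], _ => []
  | a :: b :: t, i => if a == b then i :: pvScanA t (i + 2) else pvScanA (b :: t) (i + 1)

-- itertools.product([True, False], repeat=k), in CPython's order
def pvProductA : Nat → List (List Bool)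
  | 0 => [[]]
  | k + 1 => [true, false].flatMap (fun b => (pvProductA k).map (b :: ·))

-- the per-combo body: sort zip(combo, doubles) descending, delete the non-kept positions
def pvDelComboA (w : List Char) (combo : List Bool) (doubles : List Nat) : List Char :=
  (PySem.List.sorted2 (combo.zip doubles) (fun p => p.1) (fun p => p.2) true).foldl
    (fun chars kp => if !kp.1 && decide (kp.2 < chars.length) then chars.eraseIdx kp.2 else chars) w

def deduplicate_chars_py (word : String) : List String :=
  let w := PySem.Str.lower word
  let doubles := pvScanA w.toList 0
  if doubles = [] then [w]
  else
    let doubles6 := PySem.List.slice doubles none (some 6)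
    (pvProductA doubles6.length).foldl
      (fun results combo =>
        PySem.Set.add results (String.ofList (pvDelComboA w.toList combo doubles6)))
      PySem.Set.empty

-- ===== PORT B =====
-- Source B's greedy token pass: a single char, or a doubled pair (branchable iff among the first 6)
def pvTokensB : List Char → Nat → List (Char × Option Bool)
  | [], _ => []
  | [c], _ => [(c, none)]
  | a :: b :: t, k =>
    if a == b then (a, some (decide (k < 6))) :: pvTokensB t (k + 1)
    else (a, none) :: pvTokensB (b :: t) k

-- Source B's loop body over one reversed token
def pvStepB (parts : List (List Char)) (tok : Char × Option Bool) : List (List Char) :=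
  match tok.2 with
  | none => parts.map (fun p => tok.1 :: p)
  | some true => parts.map (fun p => tok.1 :: tok.1 :: p) ++ parts.map (fun p => tok.1 :: p)
  | some false => parts.map (fun p => tok.1 :: tok.1 :: p)

def deduplicate_chars_py_alt (word : String) : List String :=
  PySem.Set.ofList
    ((((pvTokensB (PySem.Str.lower word).toList 0).reverse.foldl pvStepB [[]]).map String.ofList))

-- ===== PRECONDITION & SPEC =====
def Spec_deduplicate_chars_py (word : String) (out : List String) : Prop := out = deduplicate_chars_py_alt word
instance (word : String) (out : List String) : Decidable (Spec_deduplicate_chars_py word out) := by unfold Spec_deduplicate_chars_py; infer_instance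

-- ===== CLAIM (what is proved, stated in full; the proofs are below) =====
def Claim_equal_deduplicate_chars_py : Prop := ∀ (word : String), Dom_deduplicate_chars_py word → Spec_deduplicate_chars_py word (deduplicate_chars_py word)

-- ===== LEMMAS AND PROOFS =====

-- the common reference value: the variant of cs selected by one keep/drop bit per
-- successive greedy double (missing bits mean "keep both")
def pvBuild : List Char → List Bool → List Char
  | [], _ => []
  | [c], _ => [c]
  | a :: b :: t, bits =>
    if a == b then
      match bits with
      | [] => a :: b :: pvBuild t []
      | k :: ks => if k then a :: b :: pvBuild t ks else a :: pvBuild t ks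
    else a :: pvBuild (b :: t) bits

-- countdown-budget form of B's computation (what the reversed-token fold amounts to)
def pvRecB : List Char → Nat → List (List Char)
  | [], _ => [[]]
  | [c], _ => [[c]]
  | a :: b :: t, budget =>
    if a == b then
      if 0 < budget then
        ((pvRecB t (budget - 1)).map (fun s => a :: a :: s)) ++
          ((pvRecB t (budget - 1)).map (fun s => a :: s))
      else (pvRecB t budget).map (fun s => a :: a :: s)
    else (pvRecB (b :: t) budget).map (fun s => a :: s)

-- guarded right-to-left deletion at an ascending list of positions
def pvEg (cs : List Char) (ps : List Nat) : List Char :=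
  ps.foldr (fun p l => if p < l.length then l.eraseIdx p else l) cs

-- positions of the non-kept doubles
def pvFalsePos (bits : List Bool) (ds : List Nat) : List Nat :=
  ((bits.zip ds).filter (fun p => !p.1)).map (fun p => p.2)

lemma pvBuild_nil : ∀ cs : List Char, pvBuild cs [] = cs
  | [] => rfl
  | [_] => rfl
  | a :: b :: t => by
      simp only [pvBuild]
      split
      · simp [pvBuild_nil t]
      · simp [pvBuild_nil (b :: t)]

lemma pvScanA_shift : ∀ (cs : List Char) (i j : Nat),
    pvScanA cs (i + j) = (pvScanA cs i).map (fun x => x + j)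
  | [], _, _ => rfl
  | [_], _, _ => rfl
  | a :: b :: t, i, j => by
      simp only [pvScanA]
      split
      · have := pvScanA_shift t (i + 2) j
        have h2 : i + j + 2 = i + 2 + j := by omega
        rw [h2, this, List.map_cons]
      · have h1 : i + j + 1 = i + 1 + j := by omega
        rw [h1, pvScanA_shift (b :: t) (i + 1) j]

lemma pvScanA_ge : ∀ (cs : List Char) (i x : Nat), x ∈ pvScanA cs i → i ≤ x
  | [], _, _ => by simp [pvScanA]
  | [_], _, _ => by simp [pvScanA]
  | a :: b :: t, i, x => by
      simp only [pvScanA]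
      split
      · intro hx
        rcases List.mem_cons.1 hx with h | h
        · omega
        · have := pvScanA_ge t (i + 2) x h; omega
      · intro hx
        have := pvScanA_ge (b :: t) (i + 1) x hx; omega

lemma pvScanA_pairwise' : ∀ (cs : List Char) (i : Nat), (pvScanA cs i).Pairwise (· < ·)
  | [], _ => by simp [pvScanA]
  | [_], _ => by simp [pvScanA]
  | a :: b :: t, i => by
      simp only [pvScanA]
      split
      · refine List.Pairwise.cons ?_ (pvScanA_pairwise' t (i + 2))
        intro x hx
        have := pvScanA_ge t (i + 2) x hx; omega
      · exact pvScanA_pairwise' (b :: t) (i + 1)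

lemma pvScanA_pairwise (cs : List Char) : (pvScanA cs 0).Pairwise (· < ·) :=
  pvScanA_pairwise' cs 0

lemma pvEg_shift1 (a : Char) (l : List Char) : ∀ ps : List Nat,
    pvEg (a :: l) (ps.map (· + 1)) = a :: pvEg l ps
  | [] => rfl
  | p :: ps => by
      simp only [List.map_cons, pvEg, List.foldr_cons]
      have ih := pvEg_shift1 a l ps
      simp only [pvEg] at ih
      rw [ih]
      by_cases h : p < (List.foldr (fun p l => if p < l.length then l.eraseIdx p else l) l ps).length
      · rw [if_pos (by simp; omega), if_pos h, List.eraseIdx_cons_succ]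
      · rw [if_neg (by simp; omega), if_neg h]

lemma pvFalsePos_map (bits : List Bool) (ds : List Nat) (f : Nat → Nat) :
    pvFalsePos bits (ds.map f) = (pvFalsePos bits ds).map f := by
  simp only [pvFalsePos, List.zip_map_right, List.filter_map, List.map_map]
  rfl

lemma pvEg_shift2 (a b : Char) (l : List Char) (ps : List Nat) :
    pvEg (a :: b :: l) (ps.map (· + 2)) = a :: b :: pvEg l ps := by
  have h : ps.map (· + 2) = (ps.map (· + 1)).map (· + 1) := by
    rw [List.map_map]; apply List.map_congr_left; intro x _; simp
  rw [h, pvEg_shift1, pvEg_shift1]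

lemma pvEg_cons (cs : List Char) (p : Nat) (ps : List Nat) :
    pvEg cs (p :: ps) =
      if p < (pvEg cs ps).length then (pvEg cs ps).eraseIdx p else pvEg cs ps := rfl

lemma pvFalsePos_cons (k : Bool) (ks : List Bool) (d : Nat) (ds : List Nat) :
    pvFalsePos (k :: ks) (d :: ds) = (if k then [] else [d]) ++ pvFalsePos ks ds := by
  simp only [pvFalsePos, List.zip_cons_cons, List.filter_cons]
  cases k <;> simp

lemma pvMain : ∀ (cs : List Char) (bits : List Bool),
    pvEg cs (pvFalsePos bits (pvScanA cs 0)) = pvBuild cs bits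
  | [], bits => by cases bits <;> simp [pvScanA, pvFalsePos, pvEg, pvBuild]
  | [c], bits => by cases bits <;> simp [pvScanA, pvFalsePos, pvEg, pvBuild]
  | a :: b :: t, bits => by
      by_cases hab : a = b
      · have hscan : pvScanA (a :: b :: t) 0 = 0 :: (pvScanA t 0).map (· + 2) := by
          have hsh := pvScanA_shift t 0 2
          simp only [pvScanA, hab, BEq.rfl, if_true]
          simpa using hsh
        cases bits with
        | nil =>
            simp [pvFalsePos, pvEg, pvBuild_nil]
        | cons k ks =>
            rw [hscan, pvFalsePos_cons, pvFalsePos_map]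
            have ih := pvMain t ks
            have hrest := pvEg_shift2 a b t (pvFalsePos ks (pvScanA t 0))
            cases k
            · simp only [Bool.false_eq_true, if_false, List.cons_append, List.nil_append]
              rw [pvEg_cons, hrest, ih]
              simp [pvBuild, hab]
            · simp only [if_true, List.nil_append]
              rw [hrest, ih]
              simp [pvBuild, hab]
      · have hscan : pvScanA (a :: b :: t) 0 = (pvScanA (b :: t) 0).map (· + 1) := by
          have hsh := pvScanA_shift (b :: t) 0 1
          simp only [pvScanA, beq_iff_eq, if_neg hab]
          simpa using hsh
        rw [hscan, pvFalsePos_map, pvEg_shift1, pvMain (b :: t) bits]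
        simp [pvBuild, hab]

-- the comparison Python's tuple sort uses, and what A's sorted(..., reverse=True) produces
def pvLt (p q : Bool × Nat) : Bool :=
  decide (p.1 < q.1) || (!decide (q.1 < p.1) && decide (p.2 < q.2))

lemma pvLt_iff (p q : Bool × Nat) :
    pvLt p q = true ↔ (p.1 = false ∧ q.1 = true) ∨ (p.1 = q.1 ∧ p.2 < q.2) := by
  rcases p with ⟨pf, pn⟩; rcases q with ⟨qf, qn⟩
  cases pf <;> cases qf <;> simp [pvLt]

lemma pvLt_false_iff (p q : Bool × Nat) :
    pvLt p q = false ↔ ¬ ((p.1 = false ∧ q.1 = true) ∨ (p.1 = q.1 ∧ p.2 < q.2)) := by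
  rw [← pvLt_iff]; cases h : pvLt p q <;> simp

lemma pvInsert_pw (x : Bool × Nat) : ∀ ys : List (Bool × Nat),
    ys.Pairwise (fun a b => pvLt a b = false) →
    (PySem.List.insertBy (fun a b => pvLt b a) x ys).Pairwise (fun a b => pvLt a b = false)
  | [], _ => by simp [PySem.List.insertBy]
  | y :: ys, h => by
      rw [List.pairwise_cons] at h
      obtain ⟨hy, hys⟩ := h
      simp only [PySem.List.insertBy]
      split
      · rename_i hxy
        refine List.Pairwise.cons ?_ (List.Pairwise.cons hy hys)
        intro z hz
        rcases List.mem_cons.1 hz with rfl | hz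
        · rw [pvLt_iff] at hxy
          rw [pvLt_false_iff]
          rcases hxy with ⟨h1, h2⟩ | ⟨h1, h2⟩ <;> simp_all
          omega
        · have hyz := hy z hz
          rw [pvLt_iff] at hxy
          rw [pvLt_false_iff] at hyz ⊢
          rcases hxy with ⟨h1, h2⟩ | ⟨h1, h2⟩ <;>
            rcases Bool.eq_false_or_eq_true x.1 with hx | hx <;>
            rcases Bool.eq_false_or_eq_true z.1 with hz1 | hz1 <;>
            simp_all <;> omega
      · rename_i hxy
        refine List.Pairwise.cons ?_ (pvInsert_pw x ys hys)
        intro z hz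
        rcases (PySem.List.mem_insertBy _ x z ys).1 hz with rfl | hz
        · simpa using hxy
        · exact hy z hz

lemma pvFoldl_insert_pw : ∀ (L acc : List (Bool × Nat)),
    acc.Pairwise (fun a b => pvLt a b = false) →
    (L.foldl (fun acc x => PySem.List.insertBy (fun a b => pvLt b a) x acc) acc).Pairwise
      (fun a b => pvLt a b = false)
  | [], _, h => h
  | x :: L, acc, h => pvFoldl_insert_pw L _ (pvInsert_pw x acc h)

lemma pvZip_pw : ∀ (bits : List Bool) (ds : List Nat), ds.Pairwise (· < ·) →
    (bits.zip ds).Pairwise (fun p q => p.2 < q.2)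
  | [], _, _ => by simp
  | _ :: _, [], _ => by simp
  | b :: bs, d :: ds, h => by
      rw [List.pairwise_cons] at h
      refine List.Pairwise.cons ?_ (pvZip_pw bs ds h.2)
      intro q hq
      rcases q with ⟨qb, qn⟩
      exact h.1 qn (List.of_mem_zip hq).2

lemma pvSorted2_desc (bits : List Bool) (ds : List Nat) (hds : ds.Pairwise (· < ·)) :
    PySem.List.sorted2 (bits.zip ds) (fun p => p.1) (fun p => p.2) true =
      ((bits.zip ds).filter (fun p => p.1)).reverse ++
        ((bits.zip ds).filter (fun p => !p.1)).reverse := by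
  have hdef : PySem.List.sorted2 (bits.zip ds) (fun p => p.1) (fun p => p.2) true =
      (bits.zip ds).foldl (fun acc x => PySem.List.insertBy (fun a b => pvLt b a) x acc) [] := rfl
  set L := bits.zip ds with hL
  have hzpw : L.Pairwise (fun p q => p.2 < q.2) := pvZip_pw bits ds hds
  -- the target is Pairwise "not strictly below"
  have htpw : (((L.filter (fun p => p.1)).reverse ++ (L.filter (fun p => !p.1)).reverse)).Pairwise
      (fun a b => pvLt a b = false) := by
    rw [List.pairwise_append]
    refine ⟨?_, ?_, ?_⟩
    · rw [List.pairwise_reverse]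
      have := List.Pairwise.filter (fun p => p.1) hzpw
      refine this.imp_of_mem ?_
      intro a b ha hb hlt
      have ha1 : a.1 = true := by simpa using (List.mem_filter.1 ha).2
      have hb1 : b.1 = true := by simpa using (List.mem_filter.1 hb).2
      rw [pvLt_false_iff]
      simp_all
      omega
    · rw [List.pairwise_reverse]
      have := List.Pairwise.filter (fun p => !p.1) hzpw
      refine this.imp_of_mem ?_
      intro a b ha hb hlt
      have ha1 : a.1 = false := by simpa using (List.mem_filter.1 ha).2
      have hb1 : b.1 = false := by simpa using (List.mem_filter.1 hb).2
      rw [pvLt_false_iff]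
      simp_all
      omega
    · intro a ha b hb
      have ha1 : a.1 = true := by simpa using (List.mem_filter.1 (List.mem_reverse.1 ha)).2
      have hb1 : b.1 = false := by simpa using (List.mem_filter.1 (List.mem_reverse.1 hb)).2
      rw [pvLt_false_iff]
      simp_all
  have hperm : (((L.filter (fun p => p.1)).reverse ++ (L.filter (fun p => !p.1)).reverse)).Perm
      (PySem.List.sorted2 L (fun p => p.1) (fun p => p.2) true) := by
    refine List.Perm.trans (List.Perm.append (List.reverse_perm _) (List.reverse_perm _)) ?_
    exact (List.filter_append_perm _ L).trans (PySem.List.sorted2_perm L _ _ true).symm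
  have hspw : (PySem.List.sorted2 L (fun p => p.1) (fun p => p.2) true).Pairwise
      (fun a b => pvLt a b = false) := by
    rw [hdef]
    exact pvFoldl_insert_pw L [] (by simp)
  refine List.Perm.eq_of_pairwise ?_ hspw htpw hperm.symm
  intro a b _ _ h1 h2
  rw [pvLt_false_iff] at h1 h2
  rcases a with ⟨af, an⟩; rcases b with ⟨bf, bn⟩
  cases af <;> cases bf <;> simp_all <;> omega

lemma pvFoldr_false (cs : List Char) : ∀ l : List (Bool × Nat), (∀ p ∈ l, p.1 = false) →
    l.foldr (fun x acc => if !x.1 && decide (x.2 < acc.length) then acc.eraseIdx x.2 else acc) cs =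
      pvEg cs (l.map (fun p => p.2))
  | [], _ => rfl
  | p :: l, h => by
      have hp := h p (List.mem_cons_self ..)
      simp only [List.foldr_cons, List.map_cons,
        pvFoldr_false cs l (fun q hq => h q (List.mem_cons_of_mem _ hq)), pvEg_cons, hp]
      by_cases hlt : p.2 < (pvEg cs (l.map (fun p => p.2))).length <;> simp [hlt]

lemma pvDelComboA_eq (cs : List Char) (bits : List Bool) (ds : List Nat)
    (hds : ds.Pairwise (· < ·)) :
    pvDelComboA cs bits ds = pvEg cs (pvFalsePos bits ds) := by
  unfold pvDelComboA
  rw [pvSorted2_desc bits ds hds, List.foldl_append]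
  have h1 : ((bits.zip ds).filter (fun p => p.1)).reverse.foldl
      (fun chars kp => if !kp.1 && decide (kp.2 < chars.length) then chars.eraseIdx kp.2 else chars)
      cs = cs := by
    rw [PySem.List.foldl_congr_mem (g := fun acc _ => acc), PySem.List.foldl_ignore]
    intro acc x hx
    have : x.1 = true := by simpa using (List.mem_filter.1 (List.mem_reverse.1 hx)).2
    simp [this]
  rw [h1, List.foldl_reverse, pvFoldr_false]
  · rfl
  · intro p hp
    simpa using (List.mem_filter.1 hp).2

lemma pvZip_take : ∀ (bits : List Bool) (ds : List Nat) (n : Nat), bits.length ≤ n →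
    bits.zip (ds.take n) = bits.zip ds
  | [], _, _, _ => by simp
  | _ :: _, [], _, _ => by simp
  | b :: bs, d :: ds, n, h => by
      match n, h with
      | n + 1, h =>
        simp only [List.take_succ_cons, List.zip_cons_cons]
        rw [pvZip_take bs ds n (by simpa using h)]

lemma pvProductA_length : ∀ (k : Nat) (c : List Bool), c ∈ pvProductA k → c.length = k
  | 0, c => by simp [pvProductA]
  | k + 1, c => by
      simp only [pvProductA, List.flatMap_cons, List.flatMap_nil, List.append_nil, List.mem_append,
        List.mem_map]
      rintro (⟨d, hd, rfl⟩ | ⟨d, hd, rfl⟩) <;>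
        simp [pvProductA_length k d hd]

lemma pvRecB_eq : ∀ (cs : List Char) (n : Nat),
    pvRecB cs n = (pvProductA (min (pvScanA cs 0).length n)).map (pvBuild cs)
  | [], n => by simp [pvRecB, pvScanA, pvProductA, pvBuild]
  | [c], n => by simp [pvRecB, pvScanA, pvProductA, pvBuild]
  | a :: b :: t, n => by
      by_cases hab : a = b
      · have hlen : (pvScanA (a :: b :: t) 0).length = (pvScanA t 0).length + 1 := by
          simp only [pvScanA, hab, BEq.rfl, if_true, List.length_cons]
          rw [show (2 : Nat) = 0 + 2 from rfl, pvScanA_shift t 0 2]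
          simp
        rw [hlen]
        cases n with
        | zero =>
            have ih := pvRecB_eq t 0
            simp only [Nat.min_zero, pvProductA, List.map_cons, List.map_nil]
            simp only [pvRecB, hab, BEq.rfl, if_true, Nat.lt_irrefl, if_false]
            rw [ih]
            simp [pvProductA, pvBuild]
        | succ m =>
            have ih := pvRecB_eq t m
            simp only [pvRecB, hab, BEq.rfl, if_true, Nat.zero_lt_succ, Nat.add_sub_cancel]
            rw [ih, Nat.succ_min_succ]
            simp only [pvProductA, List.flatMap_cons, List.flatMap_nil, List.append_nil,
              List.map_append, List.map_map]
            congr 1 <;> apply List.map_congr_left <;> intro ks _ <;> simp [pvBuild]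
      · have hlen : (pvScanA (a :: b :: t) 0).length = (pvScanA (b :: t) 0).length := by
          simp only [pvScanA, beq_iff_eq, if_neg hab]
          rw [show (1 : Nat) = 0 + 1 from rfl, pvScanA_shift (b :: t) 0 1]
          simp
        have ih := pvRecB_eq (b :: t) n
        simp only [pvRecB, beq_iff_eq, if_neg hab]
        rw [ih, hlen, List.map_map]
        apply List.map_congr_left
        intro ks _
        simp [pvBuild, hab]

lemma pvTok_eq : ∀ (cs : List Char) (k : Nat),
    (pvTokensB cs k).reverse.foldl pvStepB [[]] = pvRecB cs (6 - k)
  | [], _ => rfl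
  | [c], _ => rfl
  | a :: b :: t, k => by
      by_cases hab : a = b
      · simp only [pvTokensB, hab, BEq.rfl, if_true, List.reverse_cons, List.foldl_append,
          List.foldl_cons, List.foldl_nil, pvTok_eq t (k + 1)]
        by_cases hk : k < 6
        · have h1 : (decide (k < 6)) = true := by simpa using hk
          have h2 : 6 - (k + 1) = (6 - k) - 1 := by omega
          have h3 : 0 < 6 - k := by omega
          simp only [pvRecB, BEq.rfl, if_true, if_pos h3, h1, h2, pvStepB]
        · have h1 : (decide (k < 6)) = false := by simpa using hk
          have h2 : 6 - (k + 1) = 6 - k := by omega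
          have h3 : ¬ 0 < 6 - k := by omega
          simp only [pvRecB, BEq.rfl, if_true, if_neg h3, h1, h2, pvStepB]
      · simp only [pvTokensB, beq_iff_eq, if_neg hab, List.reverse_cons, List.foldl_append,
          List.foldl_cons, List.foldl_nil, pvTok_eq (b :: t) k]
        simp only [pvRecB, beq_iff_eq, if_neg hab, pvStepB]

-- ===== VERDICT (by name: the statement is the Claim_ definition above) =====
theorem deduplicate_chars_py_spec : Claim_equal_deduplicate_chars_py := by
  intro word _
  unfold Spec_deduplicate_chars_py deduplicate_chars_py deduplicate_chars_py_alt
  set w := PySem.Str.lower word with hw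
  set cs := w.toList with hcs
  set ds := pvScanA cs 0 with hds
  rw [pvTok_eq cs 0]
  by_cases hnil : ds = []
  · rw [if_pos hnil, pvRecB_eq cs 6, ← hds, hnil]
    simp [pvProductA, pvBuild_nil, PySem.Set.ofList, PySem.Set.add, PySem.Set.contains, hcs,
      String.ofList_toList]
  · rw [if_neg hnil]
    have hslice : PySem.List.slice ds none (some 6) = ds.take 6 := by
      have := PySem.List.slice_to_natCast ds 6
      norm_num at this
      exact this
    rw [hslice]
    rw [show (PySem.Set.empty : PySem.Set String) = [] from rfl]
    rw [List.foldl_map (f := fun combo => String.ofList (pvDelComboA cs combo (ds.take 6)))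
        (g := PySem.Set.add) |>.symm, ← PySem.Set.ofList_eq_foldl]
    rw [pvRecB_eq cs 6, ← hds, List.map_map]
    have hm : (ds.take 6).length = min ds.length 6 := by
      rw [List.length_take, Nat.min_comm]
    rw [hm]
    have hmaps : (pvProductA (min ds.length 6)).map
        (fun combo => String.ofList (pvDelComboA cs combo (ds.take 6))) =
        (pvProductA (min ds.length 6)).map (String.ofList ∘ pvBuild cs) := by
      apply List.map_congr_left
      intro c hc
      have hclen : c.length = min ds.length 6 := pvProductA_length _ c hc
      have hpw6 : (ds.take 6).Pairwise (· < ·) :=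
        List.Pairwise.sublist (List.take_sublist 6 ds) (pvScanA_pairwise cs)
      have hfp : pvFalsePos c (ds.take 6) = pvFalsePos c ds := by
        unfold pvFalsePos
        rw [pvZip_take c ds 6 (by omega)]
      rw [pvDelComboA_eq cs c (ds.take 6) hpw6, hfp, pvMain cs c, Function.comp_apply]
    rw [hmaps]
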